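-- pv_equiv track=rewrite | github.com/qfewzz/string-similarity | string_similarity/TokenBasedStringSimilarity.py | bag_distance
-- ===== SOURCE A (Python) =====
-- def bag_distance(str1, str2):
--     """
--     Calculate the bag distance between two strings.
--
--     The bag distance between two strings is defined as the sum of the
--     absolute differences in the frequencies of each character in the strings.
--
--     Args:
--         str1 (str): The first string.
--         str2 (str): The second string.
--
--     Returns:
--         int: The bag distance between the two strings.
--
--     Example:
--         >>> bag_distance("hello", "world")
--         9
--         >>> bag_distance("python", "java")
--         4
--     """
--     # Create dictionary to store character frequencies
--     freq1 = {}
--     freq2 = {}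
--
--     # Count character frequencies in each string
--     for char in str1:
--         freq1[char] = freq1.get(char, 0) + 1
--     for char in str2:
--         freq2[char] = freq2.get(char, 0) + 1
--
--     # Calculate bag distance
--     distance = 0
--     for char in set(freq1.keys()).union(set(freq2.keys())):
--         distance += abs(freq1.get(char, 0) - freq2.get(char, 0))
--
--     return distance
-- ===== SOURCE B (Python) =====
-- def bag_distance(str1, str2):
--     # Sort-and-merge algorithm: no frequency dicts at all. Sort both strings,
--     # then walk them with two pointers; equal characters pair off, every
--     # character left unpaired (on either side) contributes 1 to the distance.
--     a = sorted(str1)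
--     b = sorted(str2)
--     i = j = d = 0
--     while i < len(a) and j < len(b):
--         if a[i] == b[j]:
--             i += 1
--             j += 1
--         elif a[i] < b[j]:
--             d += 1
--             i += 1
--         else:
--             d += 1
--             j += 1
--     return d + (len(a) - i) + (len(b) - j)
-- ===== Notes on version B (the rewrite author's own statement) =====
-- stated objective: alternative
-- what changed: B replaces A's hash-based frequency counting (two dicts plus a set-union scan with abs) by a sort-and-merge algorithm: both strings are sorted and walked with two pointers, equal characters pair off and every unpaired character counts 1; no frequency table, union or abs is used.
import Mathlib
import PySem

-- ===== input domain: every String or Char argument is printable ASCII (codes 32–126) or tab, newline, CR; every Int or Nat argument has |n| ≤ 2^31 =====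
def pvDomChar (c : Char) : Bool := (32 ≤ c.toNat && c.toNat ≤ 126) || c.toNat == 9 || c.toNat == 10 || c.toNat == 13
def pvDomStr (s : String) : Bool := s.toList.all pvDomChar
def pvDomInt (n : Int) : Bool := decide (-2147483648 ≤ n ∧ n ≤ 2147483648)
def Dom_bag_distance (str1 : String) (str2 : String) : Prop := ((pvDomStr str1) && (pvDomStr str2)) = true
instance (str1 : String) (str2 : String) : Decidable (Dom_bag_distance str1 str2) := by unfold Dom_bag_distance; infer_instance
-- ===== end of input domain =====

-- B replaces A's two frequency dicts + set-union scan by a sort-and-merge two-pointer algorithm; objective: alternative.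

-- ===== PORT A =====
def bag_distance (str1 : String) (str2 : String) : Int :=
  let freq1 := str1.toList.foldl (fun d c => d.insert c (d.getD c 0 + 1)) (PySem.Dict.empty)
  let freq2 := str2.toList.foldl (fun d c => d.insert c (d.getD c 0 + 1)) (PySem.Dict.empty)
  let ks := (PySem.Set.ofList freq1.keys).union (PySem.Set.ofList freq2.keys)
  ks.foldl (fun dist c => dist + |freq1.getD c 0 - freq2.getD c 0|) 0

-- ===== PORT B =====
-- Source B's while loop over the two sorted lists, as structural recursion on the two suffixes
def bagMerge : List Char → List Char → Int
  | [], ys => (ys.length : Int)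
  | x :: xs, [] => ((x :: xs).length : Int)
  | x :: xs, y :: ys =>
      if x = y then bagMerge xs ys
      else if x < y then 1 + bagMerge xs (y :: ys)
      else 1 + bagMerge (x :: xs) ys
termination_by xs ys => xs.length + ys.length

def bag_distance_alt (str1 : String) (str2 : String) : Int :=
  let a := PySem.List.sorted str1.toList (fun c => c) false
  let b := PySem.List.sorted str2.toList (fun c => c) false
  bagMerge a b

-- ===== PRECONDITION & SPEC =====
def Spec_bag_distance (str1 : String) (str2 : String) (out : Int) : Prop := out = bag_distance_alt str1 str2
instance (str1 : String) (str2 : String) (out : Int) : Decidable (Spec_bag_distance str1 str2 out) := by unfold Spec_bag_distance; infer_instance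

-- ===== CLAIM (what is proved, stated in full; the proofs are below) =====
def Claim_equal_bag_distance : Prop := ∀ (str1 : String) (str2 : String), Dom_bag_distance str1 str2 → Spec_bag_distance str1 str2 (bag_distance str1 str2)

-- ===== LEMMAS AND PROOFS =====

-- the common shape of A's two dict-building loops
def cfold (d : PySem.Dict Char Int) (l : List Char) : PySem.Dict Char Int :=
  l.foldl (fun d c => d.insert c (d.getD c 0 + 1)) d

theorem cfold_cons (d : PySem.Dict Char Int) (c : Char) (l : List Char) :
    cfold (d.insert c (d.getD c 0 + 1)) l = cfold d (c :: l) := rfl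

theorem keys_insert {κ ν : Type} [BEq κ] [LawfulBEq κ] (d : PySem.Dict κ ν) (k : κ) (v : ν) :
    (d.insert k v).keys = if k ∈ d.keys then d.keys else d.keys ++ [k] := by
  unfold PySem.Dict.insert PySem.Dict.keys
  have hmem : (d.contains k = true) ↔ k ∈ d.items.map Prod.fst := by
    unfold PySem.Dict.contains
    rw [List.any_eq_true]
    constructor
    · rintro ⟨p, hp, he⟩; exact List.mem_map.mpr ⟨p, hp, beq_iff_eq.mp he⟩
    · intro h; obtain ⟨p, hp, he⟩ := List.mem_map.mp h; exact ⟨p, hp, beq_iff_eq.mpr he⟩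
  by_cases h : k ∈ d.items.map Prod.fst
  · simp only [hmem.mpr h, if_pos h, if_true]
    simp only [List.map_map]
    congr 1
    funext p
    by_cases hp : (p.1 == k) = true
    · simp [beq_iff_eq.mp hp]
    · simp [hp]
  · have : ¬ (d.contains k = true) := fun hc => h (hmem.mp hc)
    simp [this, h]

theorem getD_cfold (l : List Char) (d : PySem.Dict Char Int) (x : Char) :
    (cfold d l).getD x 0 = d.getD x 0 + l.count x := by
  induction l generalizing d with
  | nil => simp [cfold]
  | cons c l ih =>
    rw [← cfold_cons, ih, PySem.Dict.getD_insert, List.count_cons]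
    by_cases hx : x = c
    · simp [hx]; ring
    · simp [hx]
      exact fun h => hx h.symm

theorem mem_keys_cfold (l : List Char) (d : PySem.Dict Char Int) (x : Char) :
    x ∈ (cfold d l).keys ↔ x ∈ d.keys ∨ x ∈ l := by
  induction l generalizing d with
  | nil => simp [cfold]
  | cons c l ih =>
    rw [← cfold_cons, ih, keys_insert]
    by_cases h : c ∈ d.keys
    · simp [h]
      constructor
      · rintro (h'|h') <;> tauto
      · rintro (h'|h'|h')
        · tauto
        · subst h'; tauto
        · tauto
    · simp [h, or_assoc]

theorem getD_empty (x : Char) : (PySem.Dict.empty (κ := Char) (ν := Int)).getD x 0 = 0 := by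
  simp [PySem.Dict.empty, PySem.Dict.getD, PySem.Dict.get?]

theorem mem_keys_empty (x : Char) : x ∈ (PySem.Dict.empty (κ := Char) (ν := Int)).keys ↔ False := by
  simp [PySem.Dict.empty, PySem.Dict.keys]

-- |n1 - n2| over Int, as the sum of the two truncated Nat subtractions
theorem abs_sub_natCast (n1 n2 : Nat) :
    |(n1 : Int) - (n2 : Int)| = ((n1 - n2 : Nat) : Int) + ((n2 - n1 : Nat) : Int) := by
  rcases le_total n1 n2 with h | h
  · rw [abs_of_nonpos (by omega : (n1:Int) - (n2:Int) ≤ 0)]; omega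
  · rw [abs_of_nonneg (by omega : (0:Int) ≤ (n1:Int) - (n2:Int))]; omega

theorem map_sum_add (U : List Char) (g h : Char → Int) :
    (U.map (fun c => g c + h c)).sum = (U.map g).sum + (U.map h).sum := by
  induction U with
  | nil => simp
  | cons c U ih => simp [ih]; ring

theorem map_sum_natCast (U : List Char) (n : Char → Nat) :
    (U.map (fun c => (n c : Int))).sum = ((U.map n).sum : Int) := by
  induction U with
  | nil => simp
  | cons c U ih => simp [ih]

-- summing a multiset's counts over a nodup list covering its support gives its card
theorem card_eq_sum_count_list (U : List Char) (hU : U.Nodup) :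
    ∀ (m : Multiset Char), (∀ a ∈ m, a ∈ U) → (U.map (fun c => m.count c)).sum = m.card := by
  induction U with
  | nil =>
    intro m hm
    have : m = 0 := Multiset.eq_zero_of_forall_notMem (fun a ha => by simpa using hm a ha)
    simp [this]
  | cons c U ih =>
    intro m hm
    have hc : c ∉ U := (List.nodup_cons.mp hU).1
    have hU' : U.Nodup := (List.nodup_cons.mp hU).2
    set m' := m.filter (fun a => ¬ a = c) with hm'
    have hcount : ∀ a ∈ U, m.count a = m'.count a := by
      intro a ha
      have : ¬ a = c := fun he => hc (he ▸ ha)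
      rw [hm', Multiset.count_filter]
      simp [this]
    have hsup : ∀ a ∈ m', a ∈ U := by
      intro a ha
      rw [hm', Multiset.mem_filter] at ha
      have := hm a ha.1
      rcases List.mem_cons.mp this with h | h
      · exact absurd h ha.2
      · exact h
    have hsplit : m.card = m.count c + m'.card := by
      have h1 : (Multiset.filter (fun a => c = a) m).card = m.count c := by
        rw [← Multiset.countP_eq_card_filter]
        rfl
      have h2 : (Multiset.filter (fun a => ¬ c = a) m) = m' := by
        rw [hm']
        congr 1
        funext a
        by_cases h : a = c
        · simp [h]
        · simp [h]
          exact fun hh => h hh.symm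
      conv_lhs => rw [← Multiset.filter_add_not (fun a => c = a) m]
      rw [Multiset.card_add, h1, h2]
    rw [List.map_cons, List.sum_cons,
        List.map_congr_left (fun a ha => hcount a ha), ih hU' m' hsup, hsplit]

-- subtracting a multiset not containing x from x ::ₘ s
theorem cons_sub_notMem_left {x : Char} (s t : Multiset Char) (h : x ∉ t) :
    (x ::ₘ s) - t = x ::ₘ (s - t) := by
  ext a
  by_cases ha : a = x
  · subst ha
    have h0 : t.count a = 0 := Multiset.count_eq_zero.mpr h
    simp only [Multiset.count_sub, Multiset.count_cons, h0]
    omega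
  · simp only [Multiset.count_sub, Multiset.count_cons, if_neg ha]
    omega

theorem sub_cons_notMem_right {x : Char} (s t : Multiset Char) (h : x ∉ t) :
    t - (x ::ₘ s) = t - s := by
  ext a
  by_cases ha : a = x
  · subst ha
    have h0 : t.count a = 0 := Multiset.count_eq_zero.mpr h
    simp only [Multiset.count_sub, Multiset.count_cons, h0]
    omega
  · simp only [Multiset.count_sub, Multiset.count_cons, if_neg ha]
    omega

-- B's merge on two (≤)-sorted lists counts the two multiset differences
theorem bagMerge_card (xs ys : List Char) :
    xs.Pairwise (· ≤ ·) → ys.Pairwise (· ≤ ·) →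
    bagMerge xs ys =
      ((((xs : Multiset Char) - (ys : Multiset Char)).card : Int)
        + (((ys : Multiset Char) - (xs : Multiset Char)).card : Int)) := by
  induction xs, ys using bagMerge.induct with
  | case1 ys =>
    intro _ _
    simp [bagMerge]
  | case2 x xs =>
    intro _ _
    simp [bagMerge]
  | case3 xs y ys ih =>
    intro hxs hys
    rw [bagMerge, if_pos rfl, ih (List.Pairwise.sublist (List.sublist_cons_self _ _) hxs)
          (List.Pairwise.sublist (List.sublist_cons_self _ _) hys)]
    have h1 : ∀ us vs : List Char,
        ((y :: us : List Char) : Multiset Char) - ((y :: vs : List Char) : Multiset Char)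
        = ((us : Multiset Char) - (vs : Multiset Char)) := by
      intro us vs
      rw [← Multiset.cons_coe, ← Multiset.cons_coe, Multiset.sub_cons,
          Multiset.erase_cons_head]
    rw [h1, h1]
  | case4 x xs y ys hne hlt ih =>
    intro hxs hys
    rw [bagMerge, if_neg hne, if_pos hlt,
        ih (List.Pairwise.sublist (List.sublist_cons_self _ _) hxs) hys]
    have hnm : x ∉ ((y :: ys : List Char) : Multiset Char) := by
      rw [Multiset.mem_coe]
      intro hmem
      rcases List.mem_cons.mp hmem with h | h
      · exact hne h
      · have := (List.pairwise_cons.mp hys).1 x h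
        exact absurd hlt (not_lt.mpr this)
    have h1 : ((x :: xs : List Char) : Multiset Char) - ((y :: ys : List Char) : Multiset Char)
        = x ::ₘ ((xs : Multiset Char) - ((y :: ys : List Char) : Multiset Char)) := by
      rw [← Multiset.cons_coe]
      exact cons_sub_notMem_left _ _ hnm
    have h2 : ((y :: ys : List Char) : Multiset Char) - ((x :: xs : List Char) : Multiset Char)
        = ((y :: ys : List Char) : Multiset Char) - (xs : Multiset Char) := by
      have := sub_cons_notMem_right (x := x) (↑xs) (↑(y :: ys)) hnm
      simpa [Multiset.cons_coe] using this
    rw [h1, h2, Multiset.card_cons]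
    push_cast
    ring
  | case5 x xs y ys hne hnlt ih =>
    intro hxs hys
    rw [bagMerge, if_neg hne, if_neg hnlt,
        ih hxs (List.Pairwise.sublist (List.sublist_cons_self _ _) hys)]
    have hylt : y < x := lt_of_le_of_ne (not_lt.mp hnlt) (fun h => hne h.symm)
    have hnm : y ∉ ((x :: xs : List Char) : Multiset Char) := by
      rw [Multiset.mem_coe]
      intro hmem
      rcases List.mem_cons.mp hmem with h | h
      · exact hne h.symm
      · have := (List.pairwise_cons.mp hxs).1 y h
        exact absurd hylt (not_lt.mpr this)
    have h1 : ((y :: ys : List Char) : Multiset Char) - ((x :: xs : List Char) : Multiset Char)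
        = y ::ₘ ((ys : Multiset Char) - ((x :: xs : List Char) : Multiset Char)) := by
      rw [← Multiset.cons_coe]
      exact cons_sub_notMem_left _ _ hnm
    have h2 : ((x :: xs : List Char) : Multiset Char) - ((y :: ys : List Char) : Multiset Char)
        = ((x :: xs : List Char) : Multiset Char) - (ys : Multiset Char) := by
      have := sub_cons_notMem_right (x := y) (↑ys) (↑(x :: xs)) hnm
      simpa [Multiset.cons_coe] using this
    rw [h1, h2, Multiset.card_cons]
    push_cast
    ring

theorem bag_distance_eq_alt (s1 s2 : String) : bag_distance s1 s2 = bag_distance_alt s1 s2 := by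
  show ((PySem.Set.ofList (cfold PySem.Dict.empty s1.toList).keys).union
          (PySem.Set.ofList (cfold PySem.Dict.empty s2.toList).keys)).foldl
        (fun dist c => dist + |(cfold PySem.Dict.empty s1.toList).getD c 0
                              - (cfold PySem.Dict.empty s2.toList).getD c 0|) 0
      = bagMerge (PySem.List.sorted s1.toList (fun c => c) false)
          (PySem.List.sorted s2.toList (fun c => c) false)
  set l1 := s1.toList
  set l2 := s2.toList
  set a := PySem.List.sorted l1 (fun c => c) false with ha
  set b := PySem.List.sorted l2 (fun c => c) false with hb
  set U := (PySem.Set.ofList (cfold PySem.Dict.empty l1).keys).union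
           (PySem.Set.ofList (cfold PySem.Dict.empty l2).keys) with hU
  have hmemsub : ∀ (s t : Multiset Char) (x : Char), x ∈ s - t → x ∈ s := by
    intro s t x hx
    rw [← Multiset.count_pos] at hx ⊢
    rw [Multiset.count_sub] at hx
    omega
  have hmemU : ∀ x, x ∈ U ↔ x ∈ l1 ∨ x ∈ l2 := by
    intro x
    rw [hU, PySem.Set.mem_union, PySem.Set.mem_ofList, PySem.Set.mem_ofList,
        mem_keys_cfold, mem_keys_cfold, mem_keys_empty]
    tauto
  have hUnodup : U.Nodup := PySem.Set.nodup_union _ _ (PySem.Set.nodup_ofList _)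
  -- A's fold is a sum over U of |count1 - count2|
  rw [PySem.List.foldl_add U (fun c => |(cfold PySem.Dict.empty l1).getD c 0
                              - (cfold PySem.Dict.empty l2).getD c 0|) 0, zero_add]
  have hf : ∀ c ∈ U, |(cfold PySem.Dict.empty l1).getD c 0 - (cfold PySem.Dict.empty l2).getD c 0|
      = ((Multiset.count c (l1 : Multiset Char) - Multiset.count c (l2 : Multiset Char) : Nat) : Int)
        + ((Multiset.count c (l2 : Multiset Char) - Multiset.count c (l1 : Multiset Char) : Nat) : Int) := by
    intro c _
    rw [getD_cfold, getD_cfold, getD_empty, zero_add, zero_add, abs_sub_natCast,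
        ← Multiset.coe_count, ← Multiset.coe_count]
  rw [List.map_congr_left hf, map_sum_add U
        (fun c => ((Multiset.count c (l1 : Multiset Char) - Multiset.count c (l2 : Multiset Char) : Nat) : Int))
        (fun c => ((Multiset.count c (l2 : Multiset Char) - Multiset.count c (l1 : Multiset Char) : Nat) : Int)),
      map_sum_natCast, map_sum_natCast]
  have hcnt12 : ∀ c, (Multiset.count c (l1 : Multiset Char) - Multiset.count c (l2 : Multiset Char) : Nat)
      = ((l1 : Multiset Char) - (l2 : Multiset Char)).count c := by
    intro c; rw [Multiset.count_sub]
  have hcnt21 : ∀ c, (Multiset.count c (l2 : Multiset Char) - Multiset.count c (l1 : Multiset Char) : Nat)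
      = ((l2 : Multiset Char) - (l1 : Multiset Char)).count c := by
    intro c; rw [Multiset.count_sub]
  rw [List.map_congr_left (fun c _ => hcnt12 c), List.map_congr_left (fun c _ => hcnt21 c),
      card_eq_sum_count_list U hUnodup ((l1 : Multiset Char) - (l2 : Multiset Char))
        (fun x hx => (hmemU x).mpr (Or.inl (by
          have := hmemsub _ _ _ hx
          rwa [Multiset.mem_coe] at this))),
      card_eq_sum_count_list U hUnodup ((l2 : Multiset Char) - (l1 : Multiset Char))
        (fun x hx => (hmemU x).mpr (Or.inr (by
          have := hmemsub _ _ _ hx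
          rwa [Multiset.mem_coe] at this)))]
  -- B's side
  have hpa : a.Pairwise (· ≤ ·) := by
    have := PySem.List.sorted_pairwise (xs := l1) (key := fun c => c)
    simpa [ha] using this
  have hpb : b.Pairwise (· ≤ ·) := by
    have := PySem.List.sorted_pairwise (xs := l2) (key := fun c => c)
    simpa [hb] using this
  have hca : (a : Multiset Char) = (l1 : Multiset Char) :=
    Multiset.coe_eq_coe.mpr (PySem.List.sorted_perm _ _ _)
  have hcb : (b : Multiset Char) = (l2 : Multiset Char) :=
    Multiset.coe_eq_coe.mpr (PySem.List.sorted_perm _ _ _)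
  rw [bagMerge_card a b hpa hpb, hca, hcb]

-- ===== VERDICT (by name: the statement is the Claim_ definition above) =====
theorem bag_distance_spec : Claim_equal_bag_distance := by
  intro str1 str2 _
  unfold Spec_bag_distance
  exact bag_distance_eq_alt str1 str2
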